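-- pv_equiv track=rewrite | github.com/Felipebc2/Hackathon-CTF | Flags/Base64_Eval/b64_try_variants.py | valid_blocks_for_expr
-- ===== SOURCE A (Python) =====
-- CHARSET = "0123456789+/"
--
-- def valid_blocks_for_expr(expr: str, safe_blocks: set) -> bool:
--     """Verifica se expr (len %4==0) tem todos os blocos de 4 chars dentro de safe_blocks."""
--     if len(expr) % 4 != 0:
--         return False
--     # também garante que só usemos chars do CHARSET
--     if any(ch not in CHARSET for ch in expr):
--         return False
--     for i in range(0, len(expr), 4):
--         if expr[i:i+4] not in safe_blocks:
--             return False
--     return True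
-- ===== SOURCE B (Python) =====
-- CHARSET = "0123456789+/"
--
-- def valid_blocks_for_expr(expr: str, safe_blocks: set) -> bool:
--     """Single fused pass: consume the string four chars at a time, checking charset
--     and safe-block membership per chunk (blocks tile the string when len % 4 == 0)."""
--     if len(expr) % 4 != 0:
--         return False
--     rest = expr
--     while rest:
--         b, rest = rest[:4], rest[4:]
--         if any(c not in CHARSET for c in b) or b not in safe_blocks:
--             return False
--     return True
-- ===== Notes on version B (the rewrite author's own statement) =====
-- stated objective: alternative
-- what changed: Replaces A's two separate passes (whole-string charset scan, then an index loop with slices over range(0,len,4)) by one fused head/tail consumption loop that takes a 4-char chunk off the front each step and checks charset and safe-block membership together.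
import Mathlib
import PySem

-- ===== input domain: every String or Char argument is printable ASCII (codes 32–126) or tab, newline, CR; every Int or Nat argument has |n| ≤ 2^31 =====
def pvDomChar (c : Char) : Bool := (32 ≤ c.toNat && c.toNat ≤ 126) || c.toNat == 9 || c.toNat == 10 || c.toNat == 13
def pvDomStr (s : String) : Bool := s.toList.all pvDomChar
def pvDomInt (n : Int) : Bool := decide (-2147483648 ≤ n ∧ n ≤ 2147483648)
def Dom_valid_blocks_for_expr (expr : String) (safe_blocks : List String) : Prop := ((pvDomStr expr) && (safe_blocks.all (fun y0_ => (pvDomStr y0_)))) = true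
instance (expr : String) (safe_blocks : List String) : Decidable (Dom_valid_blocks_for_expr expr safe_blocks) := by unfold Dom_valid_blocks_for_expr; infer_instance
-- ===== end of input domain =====

-- B is an alternative single-pass decomposition of A (same cost): A's charset scan and
-- index/slice block loop are fused into one head/tail chunk-consuming loop.
-- Note: Python A takes `safe_blocks` as a set; here it is the List String of its elements,
-- and membership is element equality, exactly Python's `in` on a set of strings.

-- the module constant CHARSET, shared by both programs
def pvCHARSET : List Char := "0123456789+/".toList
-- `c not in CHARSET` (substring test on a 1-char needle = char membership, ported literally)
def pvNotCharset (c : Char) : Bool := !(PySem.Chars.isIn [c] pvCHARSET)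

-- ===== PORT A =====
-- the `for i in range(0, len(expr), 4)` loop with its early return
def pvLoopA (idxs : List Int) (cs : List Char) (safe : List String) : Bool :=
  match idxs with
  | [] => true
  | i :: rest =>
    if !(safe.contains (String.ofList (PySem.List.slice cs (some i) (some (i + 4))))) then false
    else pvLoopA rest cs safe

def valid_blocks_for_expr (expr : String) (safe_blocks : List String) : Bool :=
  if PySem.Int.mod (PySem.Str.len expr) 4 != 0 then false
  else if expr.toList.any pvNotCharset then false
  else pvLoopA (PySem.List.pyRange 0 (PySem.Str.len expr) 4) expr.toList safe_blocks

-- ===== PORT B =====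
-- the `while rest:` loop: b, rest = rest[:4], rest[4:]  (slices with nat bounds = take/drop)
def pvAltGo (rest : List Char) (safe : List String) : Bool :=
  if h : rest = [] then true
  else
    let b := rest.take 4
    if b.any pvNotCharset || !(safe.contains (String.ofList b)) then false
    else pvAltGo (rest.drop 4) safe
termination_by rest.length
decreasing_by
  have : 0 < rest.length := List.length_pos_iff.mpr h
  simp [List.length_drop]; omega

def valid_blocks_for_expr_alt (expr : String) (safe_blocks : List String) : Bool :=
  if PySem.Int.mod (PySem.Str.len expr) 4 != 0 then false
  else pvAltGo expr.toList safe_blocks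

-- ===== PRECONDITION & SPEC =====
def Spec_valid_blocks_for_expr (expr : String) (safe_blocks : List String) (out : Bool) : Prop := out = valid_blocks_for_expr_alt expr safe_blocks
instance (expr : String) (safe_blocks : List String) (out : Bool) : Decidable (Spec_valid_blocks_for_expr expr safe_blocks out) := by unfold Spec_valid_blocks_for_expr; infer_instance

-- ===== CLAIM (what is proved, stated in full; the proofs are below) =====
def Claim_equal_valid_blocks_for_expr : Prop := ∀ (expr : String) (safe_blocks : List String), Dom_valid_blocks_for_expr expr safe_blocks → Spec_valid_blocks_for_expr expr safe_blocks (valid_blocks_for_expr expr safe_blocks)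

-- ===== LEMMAS AND PROOFS =====

theorem pvAltGo_nil (safe : List String) : pvAltGo [] safe = true := by
  rw [pvAltGo]; simp

theorem pyRange_four_cons (a b : Int) (h : a < b) :
    PySem.List.pyRange a b 4 = a :: PySem.List.pyRange (a + 4) b 4 := by
  rw [PySem.List.pyRange_of_pos a b (by norm_num),
      PySem.List.pyRange_of_pos (a + 4) b (by norm_num)]
  rw [if_pos h]
  by_cases h4 : a + 4 < b
  · rw [if_pos h4]
    have hn : ((b - a + 4 - 1) / 4).toNat = ((b - (a + 4) + 4 - 1) / 4).toNat + 1 := by omega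
    rw [hn, List.range_succ_eq_map]
    simp only [List.map_cons, List.map_map]
    refine List.cons_eq_cons.mpr ⟨by norm_num, ?_⟩
    refine List.map_congr_left (fun k _ => ?_)
    simp only [Function.comp]
    push_cast
    ring
  · rw [if_neg h4]
    have hn : ((b - a + 4 - 1) / 4).toNat = 1 := by omega
    rw [hn]
    simp

-- if the 4-divisible string contains a char outside CHARSET, B's fused loop also rejects
theorem pvAltGo_false_of_bad (n : Nat) : ∀ (cs : List Char) (safe : List String),
    cs.length = 4 * n → cs.any pvNotCharset = true → pvAltGo cs safe = false := by
  induction n with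
  | zero =>
    intro cs safe hl hb
    have : cs = [] := List.eq_nil_of_length_eq_zero (by omega)
    subst this; simp at hb
  | succ m ih =>
    intro cs safe hl hb
    have hne : cs ≠ [] := by intro h; subst h; simp at hl
    rw [pvAltGo]; rw [dif_neg hne]
    cases hbt : (cs.take 4).any pvNotCharset with
    | true => simp [hbt]
    | false =>
      cases hcb : safe.contains (String.ofList (cs.take 4)) with
      | false =>
        simp only [hcb, Bool.not_false, Bool.or_true]
        simp
      | true =>
        simp only [hbt, hcb, Bool.not_true, Bool.or_false]
        rw [if_neg (by simp)]
        apply ih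
        · simp only [List.length_drop]; omega
        · have := List.take_append_drop 4 cs
          rw [← this, List.any_append] at hb
          simp only [Bool.or_eq_true] at hb
          rcases hb with hb | hb
          · rw [hbt] at hb; exact absurd hb (by simp)
          · exact hb

-- A's index/slice loop over range(0,len,4) equals B's chunk loop (no bad chars case)
theorem pvLoopA_eq_altGo (n : Nat) : ∀ (cs pre : List Char) (safe : List String),
    cs.length = 4 * n → cs.any pvNotCharset = false →
    pvLoopA (PySem.List.pyRange (pre.length) ((pre.length : Int) + cs.length) 4) (pre ++ cs) safe
      = pvAltGo cs safe := by
  induction n with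
  | zero =>
    intro cs pre safe hl _
    have : cs = [] := List.eq_nil_of_length_eq_zero (by omega)
    subst this
    rw [PySem.List.pyRange_of_pos _ _ (by norm_num)]
    simp [pvLoopA, pvAltGo_nil]
  | succ m ih =>
    intro cs pre safe hl hb
    have hne : cs ≠ [] := by intro h; subst h; simp at hl
    have hlt : (pre.length : Int) < (pre.length : Int) + cs.length := by
      have : 0 < cs.length := by omega
      omega
    rw [pyRange_four_cons _ _ hlt]
    rw [pvLoopA]
    have hslice : PySem.List.slice (pre ++ cs) (some (pre.length : Int)) (some ((pre.length : Int) + 4))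
        = cs.take 4 := by
      have h4 : ((pre.length : Int) + 4) = ((pre.length : Int) + ((4 : Nat) : Int)) := by norm_num
      rw [h4, PySem.List.slice_natCast_add, List.drop_left]
    rw [hslice]
    have hbt : (cs.take 4).any pvNotCharset = false := by
      have := List.take_append_drop 4 cs
      rw [← this, List.any_append] at hb
      simp only [Bool.or_eq_false_iff] at hb
      exact hb.1
    rw [pvAltGo, dif_neg hne]
    have htl : (cs.take 4).length = 4 := by simp; omega
    have key := ih (cs.drop 4) (pre ++ cs.take 4) safe
      (by simp only [List.length_drop]; omega)
      (by
        have := List.take_append_drop 4 cs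
        rw [← this, List.any_append] at hb
        simp only [Bool.or_eq_false_iff] at hb
        exact hb.2)
    rw [List.append_assoc, List.take_append_drop] at key
    have harg : ((pre ++ cs.take 4).length : Int) = (pre.length : Int) + 4 := by
      simp [htl]
    rw [harg] at key
    have harg2 : (pre.length : Int) + 4 + ((cs.drop 4).length : Int)
        = (pre.length : Int) + (cs.length : Int) := by
      simp only [List.length_drop]; omega
    rw [harg2] at key
    cases hcb : safe.contains (String.ofList (cs.take 4)) with
    | false =>
      simp only [hbt, hcb, Bool.not_false, Bool.or_true]
      simp
    | true =>
      simp only [hbt, hcb, Bool.not_true, Bool.or_false]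
      rw [if_neg (by simp), if_neg (by simp)]
      exact key

-- ===== VERDICT (by name: the statement is the Claim_ definition above) =====
theorem valid_blocks_for_expr_spec : Claim_equal_valid_blocks_for_expr := by
  intro expr safe _
  unfold Spec_valid_blocks_for_expr valid_blocks_for_expr valid_blocks_for_expr_alt
  by_cases hm : (PySem.Int.mod (PySem.Str.len expr) 4 != 0) = true
  · rw [if_pos hm, if_pos hm]
  · rw [if_neg hm, if_neg hm]
    have hmod : PySem.Int.mod (PySem.Str.len expr) 4 = 0 := by
      simpa using hm
    have hdvd : (4 : Int) ∣ PySem.Str.len expr := (PySem.Int.mod_eq_zero_iff_dvd _ _).mp hmod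
    have hlen : PySem.Str.len expr = (expr.toList.length : Int) := by
      simp [PySem.Str.len_eq]
    rw [hlen] at hdvd
    have hdvdN : 4 ∣ expr.toList.length := by exact_mod_cast hdvd
    obtain ⟨n, hn⟩ := hdvdN
    by_cases hb : expr.toList.any pvNotCharset = true
    · rw [if_pos hb]
      exact (pvAltGo_false_of_bad n expr.toList safe hn hb).symm
    · rw [if_neg hb]
      have hb' : expr.toList.any pvNotCharset = false := by simpa using hb
      have key := pvLoopA_eq_altGo n expr.toList [] safe hn hb'
      simpa [hlen] using key
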